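-- pv_equiv track=rewrite | github.com/osandov/drgn | tests/test_path.py | join_combinations
-- ===== SOURCE A (Python) =====
-- import itertools
--
-- def join_combinations(components):
--     if len(components) > 1:
--         for join in itertools.product([False, True], repeat=len(components) - 1):
--             combination = [components[0]]
--             for i in range(1, len(components)):
--                 if join[i - 1]:
--                     combination[-1] += "/" + components[i]
--                 else:
--                     combination.append(components[i])
--             yield combination
--     else:
--         yield components
-- ===== SOURCE B (Python) =====
-- def join_combinations(components):
--     n = len(components)
--     if n <= 1:
--         yield components
--         return
--
--     def rec(start):
--         for k in range(start + 1, n + 1):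
--             group = components[start]
--             for j in range(start + 1, k):
--                 group += "/" + components[j]
--             if k == n:
--                 yield [group]
--             else:
--                 for rest in rec(k):
--                     yield [group] + rest
--
--     yield from rec(0)
-- ===== Notes on version B (the rewrite author's own statement) =====
-- stated objective: alternative
-- what changed: B replaces A's enumeration of all 2^(n-1) boolean join-masks (itertools.product) followed by an index loop that mutates a combination list, by a recursive enumeration over the length of the first contiguous run of components, yielding groupings directly; incrementing the run length from 1 reproduces A's lexicographic order.
import Mathlib
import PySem

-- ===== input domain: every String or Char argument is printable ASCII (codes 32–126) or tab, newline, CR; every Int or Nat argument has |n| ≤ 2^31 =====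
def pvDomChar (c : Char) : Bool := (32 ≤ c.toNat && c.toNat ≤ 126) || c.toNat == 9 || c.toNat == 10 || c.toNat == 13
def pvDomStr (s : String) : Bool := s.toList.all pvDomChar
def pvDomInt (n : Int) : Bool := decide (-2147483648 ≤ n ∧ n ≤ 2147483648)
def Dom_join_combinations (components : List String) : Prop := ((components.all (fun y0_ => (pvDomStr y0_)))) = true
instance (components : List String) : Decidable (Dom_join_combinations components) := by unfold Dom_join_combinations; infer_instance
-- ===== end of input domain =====

-- B enumerates groupings recursively by the length of the first contiguous run instead of
-- iterating over all boolean join-masks (itertools.product); alternative decomposition, same output and order.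


-- ===== PORT A =====
-- itertools.product([False, True], repeat=m), in product order (leftmost varies slowest)
def pvProd : Nat → List (List Bool)
  | 0 => [[]]
  | m + 1 => [false, true].flatMap (fun b => (pvProd m).map (fun t => b :: t))

-- A's inner loop; strings are carried as List Char (Python '+' on str = append of code points; exact)
def pvBuildA (cs : List String) (join : List Bool) : List (List Char) :=
  (PySem.List.pyRange 1 (cs.length : Int) 1).foldl
    (fun comb i =>
      if PySem.List.pyGetD join (i - 1) false then
        comb.dropLast ++ [PySem.List.pyGetD comb (-1) [] ++ '/' :: (PySem.List.pyGetD cs i "").toList]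
      else
        comb ++ [(PySem.List.pyGetD cs i "").toList])
    [(PySem.List.pyGetD cs 0 "").toList]

def join_combinations (components : List String) : List (List String) :=
  if 1 < components.length then
    (pvProd (components.length - 1)).map (fun join => (pvBuildA components join).map String.ofList)
  else
    [components]

-- ===== PORT B =====
-- rec(start) of Source B; the fuel argument only makes the recursion structural (callers pass
-- fuel ≥ cs.length - start, which is always enough). Strings carried as List Char, as above.
def pvAltRec (cs : List String) : Nat → Nat → List (List (List Char))
  | 0, _ => []
  | fuel + 1, start =>
    (List.range' (start + 1) (cs.length - start)).flatMap (fun k =>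
      let group := (List.range' (start + 1) (k - (start + 1))).foldl
        (fun g j => g ++ '/' :: (cs.getD j "").toList) (cs.getD start "").toList
      if k = cs.length then [[group]]
      else (pvAltRec cs fuel k).map (fun rest => group :: rest))

def join_combinations_alt (components : List String) : List (List String) :=
  if components.length ≤ 1 then [components]
  else (pvAltRec components components.length 0).map (fun comb => comb.map String.ofList)

-- ===== PRECONDITION & SPEC =====
def Spec_join_combinations (components : List String) (out : List (List String)) : Prop := out = join_combinations_alt components
instance (components : List String) (out : List (List String)) : Decidable (Spec_join_combinations components out) := by unfold Spec_join_combinations; infer_instance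

-- ===== CLAIM (what is proved, stated in full; the proofs are below) =====
def Claim_equal_join_combinations : Prop := ∀ (components : List String), Dom_join_combinations components → Spec_join_combinations components (join_combinations components)

-- ===== LEMMAS AND PROOFS =====

-- reference shape both ports are reduced to: all groupings of acc followed by xs, new-group-first
def pvSpec : List Char → List (List Char) → List (List (List Char))
  | acc, [] => [[acc]]
  | acc, x :: xs => ((pvSpec x xs).map (fun c => acc :: c)) ++ pvSpec (acc ++ '/' :: x) xs

def pvStepZ (comb : List (List Char)) (p : Bool × List Char) : List (List Char) :=
  if p.1 then comb.dropLast ++ [PySem.List.pyGetD comb (-1) [] ++ '/' :: p.2] else comb ++ [p.2]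

def pvBuildS : List Char → List (Bool × List Char) → List (List Char)
  | acc, [] => [acc]
  | acc, (b, x) :: ps => if b then pvBuildS (acc ++ '/' :: x) ps else acc :: pvBuildS x ps

lemma pvProd_length : ∀ {m : Nat} {j : List Bool}, j ∈ pvProd m → j.length = m := by
  intro m
  induction m with
  | zero => intro j h; simp [pvProd] at h; simp [h]
  | succ m ih =>
    intro j h
    simp [pvProd] at h
    rcases h with ⟨t, ht, rfl⟩ | ⟨t, ht, rfl⟩ <;> simp [ih ht]

lemma pvZip_buildS : ∀ (ps : List (Bool × List Char)) (pre : List (List Char)) (acc : List Char),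
    ps.foldl pvStepZ (pre ++ [acc]) = pre ++ pvBuildS acc ps := by
  intro ps
  induction ps with
  | nil => intro pre acc; simp [pvBuildS]
  | cons p ps ih =>
    rcases p with ⟨b, x⟩
    intro pre acc
    cases b
    · have : pvStepZ (pre ++ [acc]) (false, x) = (pre ++ [acc]) ++ [x] := by
        simp [pvStepZ]
      simp only [List.foldl_cons, this, ih, pvBuildS]
      simp
    · have : pvStepZ (pre ++ [acc]) (true, x) = pre ++ [acc ++ '/' :: x] := by
        simp [pvStepZ, PySem.List.pyGetD_neg_one_append_singleton]
      simp only [List.foldl_cons, this, ih, pvBuildS]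
      simp

lemma pvProd_spec : ∀ (xs : List (List Char)) (acc : List Char),
    (pvProd xs.length).map (fun j => pvBuildS acc (List.zip j xs)) = pvSpec acc xs := by
  intro xs
  induction xs with
  | nil => intro acc; simp [pvProd, pvSpec, pvBuildS]
  | cons x xs ih =>
    intro acc
    simp only [List.length_cons, pvProd, List.flatMap_cons, List.flatMap_nil, List.map_append,
      List.map_map, List.append_nil, pvSpec]
    congr 1
    · rw [← ih x, List.map_map]
      rfl
    · rw [← ih (acc ++ '/' :: x)]
      rfl

-- A's index loop = fold over zip of the mask with the component tails
lemma pvBuildA_zip (cs : List String) (j : List Bool) (hj : j.length + 1 = cs.length) :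
    ∀ (l a : Nat), cs.length - a = l → 1 ≤ a → a ≤ cs.length → ∀ comb,
      (PySem.List.pyRange (a : Int) (cs.length : Int) 1).foldl
        (fun comb i =>
          if PySem.List.pyGetD j (i - 1) false then
            comb.dropLast ++ [PySem.List.pyGetD comb (-1) [] ++ '/' :: (PySem.List.pyGetD cs i "").toList]
          else
            comb ++ [(PySem.List.pyGetD cs i "").toList]) comb
      = (List.zip (j.drop (a - 1)) ((cs.drop a).map String.toList)).foldl pvStepZ comb := by
  intro l
  induction l with
  | zero =>
    intro a hl h1 h2 comb
    have ha : a = cs.length := by omega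
    rw [PySem.List.pyRange_one_eq_nil (by exact_mod_cast Nat.le_of_eq ha.symm)]
    have : j.drop (a - 1) = [] := by
      apply List.drop_eq_nil_of_le; omega
    simp [this]
  | succ l ih =>
    intro a hl h1 h2 comb
    have ha : a < cs.length := by omega
    rw [PySem.List.pyRange_one_cons (by exact_mod_cast ha)]
    have hja : a - 1 < j.length := by omega
    have hgj : PySem.List.pyGetD j ((a : Int) - 1) false = j[a - 1] := by
      have : (a : Int) - 1 = ((a - 1 : Nat) : Int) := by
        have := Int.natCast_sub h1
        push_cast at this ⊢
        omega
      rw [this, PySem.List.pyGetD_natCast, List.getD_eq_getElem?_getD, List.getElem?_eq_getElem hja]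
      rfl
    have hgc : PySem.List.pyGetD cs (a : Int) "" = cs[a] := by
      rw [PySem.List.pyGetD_natCast, List.getD_eq_getElem?_getD, List.getElem?_eq_getElem ha]
      rfl
    have hdj : j.drop (a - 1) = j[a - 1] :: j.drop a := by
      have h := List.drop_eq_getElem_cons hja
      rw [show a - 1 + 1 = a by omega] at h
      exact h
    have hdc : cs.drop a = cs[a] :: cs.drop (a + 1) := List.drop_eq_getElem_cons ha
    rw [hdj, hdc]
    simp only [List.map_cons, List.zip_cons_cons, List.foldl_cons, hgj, hgc]
    have hstep : ∀ comb : List (List Char),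
        (if j[a-1] then comb.dropLast ++ [PySem.List.pyGetD comb (-1) [] ++ '/' :: (cs[a]).toList]
         else comb ++ [(cs[a]).toList]) = pvStepZ comb (j[a-1], (cs[a]).toList) := by
      intro comb; rfl
    rw [hstep]
    have := ih (a + 1) (by omega) (by omega) (by omega)
      (pvStepZ comb (j[a-1], (cs[a]).toList))
    simp only [Nat.add_sub_cancel] at this
    push_cast at this
    exact this

lemma pvAltRec_fuel (cs : List String) : ∀ (fuel fuel' start : Nat),
    cs.length - start ≤ fuel → cs.length - start ≤ fuel' →
    pvAltRec cs fuel start = pvAltRec cs fuel' start := by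
  intro fuel
  induction fuel with
  | zero =>
    intro fuel' start h h'
    have : cs.length - start = 0 := by omega
    cases fuel' with
    | zero => rfl
    | succ f => simp [pvAltRec, this]
  | succ fuel ih =>
    intro fuel' start h h'
    cases fuel' with
    | zero =>
      have : cs.length - start = 0 := by omega
      simp [pvAltRec, this]
    | succ f =>
      simp only [pvAltRec]
      apply List.flatMap_congr
      intro k hk
      have hmem := List.mem_range'_1.mp hk
      have hk1 : start + 1 ≤ k := hmem.1
      have hk2 : k < start + 1 + (cs.length - start) := hmem.2
      by_cases hkn : k = cs.length
      · simp [hkn]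
      · simp only [if_neg hkn]
        rw [ih f k (by omega) (by omega)]

-- B's run-length loop, generalized over the accumulated first group, equals pvSpec
lemma pvAltRec_spec (cs : List String) :
    ∀ (fuel m : Nat) (acc : List Char), m < cs.length → cs.length - m ≤ fuel + 1 →
      (List.range' (m + 1) (cs.length - m)).flatMap (fun k =>
        let group := (List.range' (m + 1) (k - (m + 1))).foldl
          (fun g j => g ++ '/' :: (cs.getD j "").toList) acc
        if k = cs.length then [[group]]
        else (pvAltRec cs fuel k).map (fun rest => group :: rest))
      = pvSpec acc ((cs.drop (m + 1)).map String.toList) := by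
  intro fuel
  induction fuel with
  | zero =>
    intro m acc hm hf
    have h1 : cs.length - m = 1 := by omega
    have h2 : m + 1 = cs.length := by omega
    rw [h1]
    simp [List.range'_one, h2, List.drop_length, pvSpec]
  | succ fuel ih =>
    intro m acc hm hf
    by_cases h2 : m + 1 = cs.length
    · have h1 : cs.length - m = 1 := by omega
      rw [h1]
      simp [List.range'_one, h2, List.drop_length, pvSpec]
    · have hm1 : m + 1 < cs.length := by omega
      have hr : cs.length - m = (cs.length - m - 1) + 1 := by omega
      rw [hr, List.range'_succ, List.flatMap_cons]
      have hfirst :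
          (let group := (List.range' (m + 1) (m + 1 - (m + 1))).foldl
              (fun g j => g ++ '/' :: (cs.getD j "").toList) acc
            if m + 1 = cs.length then [[group]]
            else (pvAltRec cs (fuel + 1) (m + 1)).map (fun rest => group :: rest))
          = ((pvSpec ((cs.getD (m + 1) "").toList) ((cs.drop (m + 2)).map String.toList)).map
              (fun c => acc :: c)) := by
        simp only [Nat.sub_self, List.range'_zero, List.foldl_nil, if_neg h2]
        congr 1
        show pvAltRec cs (fuel + 1) (m + 1) = _
        rw [show pvAltRec cs (fuel + 1) (m + 1)
            = (List.range' (m + 2) (cs.length - (m + 1))).flatMap (fun k =>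
                let group := (List.range' (m + 2) (k - (m + 2))).foldl
                  (fun g j => g ++ '/' :: (cs.getD j "").toList) (cs.getD (m + 1) "").toList
                if k = cs.length then [[group]]
                else (pvAltRec cs fuel k).map (fun rest => group :: rest)) from rfl]
        exact ih (m + 1) _ hm1 (by omega)
      rw [hfirst]
      have hrest :
          (List.range' (m + 1 + 1) (cs.length - m - 1)).flatMap (fun k =>
            let group := (List.range' (m + 1) (k - (m + 1))).foldl
              (fun g j => g ++ '/' :: (cs.getD j "").toList) acc
            if k = cs.length then [[group]]
            else (pvAltRec cs (fuel + 1) k).map (fun rest => group :: rest))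
          = pvSpec (acc ++ '/' :: (cs.getD (m + 1) "").toList) ((cs.drop (m + 2)).map String.toList) := by
        have hcong : ∀ k ∈ List.range' (m + 1 + 1) (cs.length - m - 1),
            (let group := (List.range' (m + 1) (k - (m + 1))).foldl
                (fun g j => g ++ '/' :: (cs.getD j "").toList) acc
              if k = cs.length then [[group]]
              else (pvAltRec cs (fuel + 1) k).map (fun rest => group :: rest))
            = (let group := (List.range' (m + 2) (k - (m + 2))).foldl
                (fun g j => g ++ '/' :: (cs.getD j "").toList)
                (acc ++ '/' :: (cs.getD (m + 1) "").toList)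
              if k = cs.length then [[group]]
              else (pvAltRec cs fuel k).map (fun rest => group :: rest)) := by
          intro k hk
          have hmem := List.mem_range'_1.mp hk
          have hk1 : m + 2 ≤ k := hmem.1
          have hk2 : k < m + 2 + (cs.length - m - 1) := hmem.2
          have hshift : List.range' (m + 1) (k - (m + 1)) = (m + 1) :: List.range' (m + 2) (k - (m + 2)) := by
            rw [show k - (m + 1) = (k - (m + 2)) + 1 by omega, List.range'_succ]
          simp only [hshift, List.foldl_cons]
          by_cases hkn : k = cs.length
          · simp [hkn]
          · simp only [if_neg hkn]
            rw [pvAltRec_fuel cs (fuel + 1) fuel k (by omega) (by omega)]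
        rw [List.flatMap_congr hcong]
        exact ih (m + 1) _ hm1 (by omega)
      rw [hrest]
      have hdrop : (cs.drop (m + 1)).map String.toList
          = (cs.getD (m + 1) "").toList :: ((cs.drop (m + 2)).map String.toList) := by
        rw [List.drop_eq_getElem_cons hm1, List.map_cons]
        congr 2
        rw [List.getD_eq_getElem?_getD, List.getElem?_eq_getElem hm1]
        rfl
      rw [hdrop]
      rfl

lemma pv_main : ∀ (cs : List String), join_combinations cs = join_combinations_alt cs := by
  intro cs
  by_cases h : 1 < cs.length
  · obtain ⟨f, hf⟩ : ∃ f, cs.length = f + 1 := ⟨cs.length - 1, by omega⟩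
    have hA : join_combinations cs
        = (pvProd (cs.length - 1)).map (fun j => (pvBuildA cs j).map String.ofList) := by
      simp [join_combinations, h]
    have hB : join_combinations_alt cs
        = (pvAltRec cs cs.length 0).map (fun comb => comb.map String.ofList) := by
      simp [join_combinations_alt]
      omega
    rw [hA, hB]
    have hBspec : pvAltRec cs cs.length 0
        = pvSpec ((cs.getD 0 "").toList) ((cs.drop 1).map String.toList) := by
      rw [hf]
      rw [show pvAltRec cs (f + 1) 0
          = (List.range' 1 (cs.length - 0)).flatMap (fun k =>
              let group := (List.range' 1 (k - 1)).foldl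
                (fun g j => g ++ '/' :: (cs.getD j "").toList) (cs.getD 0 "").toList
              if k = cs.length then [[group]]
              else (pvAltRec cs f k).map (fun rest => group :: rest)) from rfl]
      have := pvAltRec_spec cs f 0 ((cs.getD 0 "").toList) (by omega) (by omega)
      simpa using this
    have hAj : ∀ j ∈ pvProd (cs.length - 1),
        (pvBuildA cs j).map String.ofList
          = (pvBuildS ((cs.getD 0 "").toList) (List.zip j ((cs.drop 1).map String.toList))).map String.ofList := by
      intro j hjmem
      have hjlen : j.length + 1 = cs.length := by
        have := pvProd_length hjmem
        omega
      congr 1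
      have hz := pvBuildA_zip cs j hjlen (cs.length - 1) 1 (by omega) (by omega) (by omega)
        [(PySem.List.pyGetD cs 0 "").toList]
      unfold pvBuildA
      rw [show ((1 : Nat) : Int) = (1 : Int) from rfl] at hz
      rw [hz]
      have := pvZip_buildS (List.zip (j.drop 0) ((cs.drop 1).map String.toList)) []
        ((PySem.List.pyGetD cs 0 "").toList)
      simp only [List.nil_append] at this
      rw [this]
      simp [PySem.List.pyGetD_zero]
    rw [List.map_congr_left hAj]
    have hmm : (pvProd (cs.length - 1)).map
        (fun j => (pvBuildS ((cs.getD 0 "").toList) (List.zip j ((cs.drop 1).map String.toList))).map String.ofList)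
        = ((pvProd (cs.length - 1)).map
            (fun j => pvBuildS ((cs.getD 0 "").toList) (List.zip j ((cs.drop 1).map String.toList)))).map
          (fun c => c.map String.ofList) := by
      rw [List.map_map]; rfl
    rw [hmm]
    have hlen : ((cs.drop 1).map String.toList).length = cs.length - 1 := by simp
    rw [show cs.length - 1 = ((cs.drop 1).map String.toList).length from hlen.symm]
    rw [pvProd_spec, hBspec]
  · have hle : cs.length ≤ 1 := by omega
    simp [join_combinations, join_combinations_alt, h, hle]

-- ===== VERDICT (by name: the statement is the Claim_ definition above) =====
theorem join_combinations_spec : Claim_equal_join_combinations := by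
  intro components _
  exact pv_main components
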